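-- pv_equiv track=rewrite | github.com/zenyichong/advent-of-code-2020 | day_17/day_17.py | add_padding_4d
-- ===== SOURCE A (Python) =====
-- INACTIVE = '.'
--
-- def add_padding_4d(grid):
--     new = []
--     new_dim_z = len(grid[0]) + 2
--     new_dim_x = new_dim_y = len(grid[0][0]) + 2
--     empty_layer = [INACTIVE * new_dim_x for _ in range(new_dim_y)]
--     empty_cube = [empty_layer[:] for _ in range(new_dim_z)]
--     empty_row = INACTIVE * new_dim_x
--     for cube in grid:
--         tmp_cube = []
--         for layer in cube:
--             tmp_layer = []
--             for row in layer:
--                 row = INACTIVE + row + INACTIVE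
--                 tmp_layer.append(row)
--             tmp_layer = [empty_row] + tmp_layer + [empty_row]
--             tmp_cube.append(tmp_layer)
--         tmp_cube = [empty_layer] + tmp_cube + [empty_layer]
--         new.append(tmp_cube)
--     new = [empty_cube] + new + [empty_cube]
--     return new
-- ===== SOURCE B (Python) =====
-- INACTIVE = '.'
--
-- def add_padding_4d(grid):
--     # Recursive decomposition: one generic pad helper walks the nesting;
--     # filler sizes are derived once from grid[0] / grid[0][0], as the task does.
--     new_dim_z = len(grid[0]) + 2
--     new_dim_x = len(grid[0][0]) + 2
--     empty_row = INACTIVE * new_dim_x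
--     empty_layer = [empty_row] * new_dim_x
--     empty_cube = [empty_layer] * new_dim_z
--     def pad(x, fillers):
--         if isinstance(x, str):
--             return INACTIVE + x + INACTIVE
--         return [fillers[0]] + [pad(c, fillers[1:]) for c in x] + [fillers[0]]
--     return pad(grid, [empty_cube, empty_layer, empty_row])
-- ===== Notes on version B (the rewrite author's own statement) =====
-- stated objective: simpler
-- what changed: Replaced A's three nested accumulate-and-append loops by a single generic recursive pad helper applied level by level, with the fixed all-inactive fillers computed once via list replication.
-- outside the precondition, e.g. on add_padding_4d([]): A raises IndexError, B raises IndexError; on add_padding_4d([[]]): A raises IndexError, B raises IndexError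
import Mathlib
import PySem

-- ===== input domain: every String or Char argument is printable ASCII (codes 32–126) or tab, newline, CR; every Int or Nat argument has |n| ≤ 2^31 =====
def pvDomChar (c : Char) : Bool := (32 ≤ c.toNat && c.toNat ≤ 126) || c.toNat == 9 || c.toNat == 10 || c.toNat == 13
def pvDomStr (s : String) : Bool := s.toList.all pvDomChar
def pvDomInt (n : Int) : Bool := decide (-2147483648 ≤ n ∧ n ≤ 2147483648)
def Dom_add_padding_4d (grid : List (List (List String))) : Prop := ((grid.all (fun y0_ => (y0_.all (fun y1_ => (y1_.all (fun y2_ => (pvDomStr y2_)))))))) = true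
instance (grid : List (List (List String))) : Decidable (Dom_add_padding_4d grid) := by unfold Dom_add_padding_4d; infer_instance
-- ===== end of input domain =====

-- B pads the nested structure with one generic pad helper per level instead of A's
-- triple nested append loop; objective: simpler/alternative decomposition, same cost.

-- ===== PORT A =====
-- '.' * n  (exact for the ASCII dot)
def pyDots (n : Nat) : String := String.mk (List.replicate n '.')

def add_padding_4d (grid : List (List (List String))) : List (List (List String)) :=
  let new_dim_z := (grid.headD []).length + 2          -- len(grid[0]) + 2 (Pre_ excludes grid = [])
  let new_dim_x := ((grid.headD []).headD []).length + 2  -- len(grid[0][0]) + 2 (Pre_ excludes grid[0] = [])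
  let empty_layer := (List.range new_dim_x).map (fun _ => pyDots new_dim_x)
  let empty_cube := (List.range new_dim_z).map (fun _ => empty_layer)
  let empty_row := pyDots new_dim_x
  let new := grid.foldl (fun acc cube =>
      let tmp_cube := cube.foldl (fun tc layer =>
          let tmp_layer := layer.foldl (fun tl row => tl ++ ["." ++ row ++ "."]) []
          tc ++ [[empty_row] ++ tmp_layer ++ [empty_row]]) []
      acc ++ [[empty_layer] ++ tmp_cube ++ [empty_layer]]) []
  [empty_cube] ++ new ++ [empty_cube]

-- ===== PORT B =====
-- Source B's generic pad helper at list level: one filler in front, the padded children, one filler behind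
def padMid {A : Type} (filler : A) (mid : List A) : List A := filler :: (mid ++ [filler])

def add_padding_4d_alt (grid : List (List (List String))) : List (List (List String)) :=
  let new_dim_z := (grid.headD []).length + 2
  let new_dim_x := ((grid.headD []).headD []).length + 2
  let empty_row : String := String.mk (List.replicate new_dim_x '.')
  let empty_layer := List.replicate new_dim_x empty_row
  let empty_cube := List.replicate new_dim_z empty_layer
  padMid empty_cube (grid.map (fun cube =>
    padMid empty_layer (cube.map (fun layer =>
      padMid empty_row (layer.map (fun r => "." ++ r ++ "."))))))

-- ===== PRECONDITION & SPEC =====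
-- Pre_ excludes exactly the inputs where A raises IndexError: grid == [] (grid[0]) or grid[0] == [] (grid[0][0]).
def Pre_add_padding_4d (grid : List (List (List String))) : Prop :=
  grid ≠ [] ∧ grid.headD [] ≠ []
instance (grid : List (List (List String))) : Decidable (Pre_add_padding_4d grid) := by
  unfold Pre_add_padding_4d; infer_instance
def pvWitness_add_padding_4d : List (List (List String)) := [[["#"]]]
def Spec_add_padding_4d (grid : List (List (List String))) (out : List (List (List String))) : Prop := out = add_padding_4d_alt grid
instance (grid : List (List (List String))) (out : List (List (List String))) : Decidable (Spec_add_padding_4d grid out) := by unfold Spec_add_padding_4d; infer_instance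

-- ===== CLAIM (what is proved, stated in full; the proofs are below) =====
def Claim_equal_add_padding_4d : Prop := ∀ (grid : List (List (List String))), Dom_add_padding_4d grid → Pre_add_padding_4d grid → Spec_add_padding_4d grid (add_padding_4d grid)

-- ===== LEMMAS AND PROOFS =====

-- ===== VERDICT (by name: the statement is the Claim_ definition above) =====
lemma foldl_append_singleton_map {A B : Type} (f : A → B) (l : List A) (init : List B) :
    l.foldl (fun acc x => acc ++ [f x]) init = init ++ l.map f := by
  induction l generalizing init with
  | nil => simp
  | cons x xs ih => simp [List.foldl_cons, ih]

lemma range_map_const {A : Type} (n : Nat) (e : A) :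
    (List.range n).map (fun _ => e) = List.replicate n e := by
  induction n with
  | zero => simp
  | succ m ih => simp [List.range_succ, ih, List.replicate_succ']

theorem add_padding_4d_spec : Claim_equal_add_padding_4d := by
  intro grid _ _
  unfold Spec_add_padding_4d add_padding_4d add_padding_4d_alt padMid pyDots
  simp only [foldl_append_singleton_map, range_map_const, List.nil_append]
  rfl
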